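-- pv_equiv track=rewrite | github.com/rticommunity/rti-genesis | genesis_lib/graph_monitoring.py | _derive_node_name
-- ===== SOURCE A (Python) =====
-- COMPONENT_TYPE = {
--     "INTERFACE": 0,
--     "AGENT_PRIMARY": 1,
--     "AGENT_SPECIALIZED": 2,
--     "FUNCTION": 3,
--     "SERVICE": 4
-- }
--
-- def _derive_node_name(component_type: int, attrs: dict | None, component_id: str) -> str:
--     attrs = attrs or {}
--     try:
--         ct_str = [k for k, v in COMPONENT_TYPE.items() if v == int(component_type)][0]
--     except Exception:
--         ct_str = "UNKNOWN"
--     if ct_str == "SERVICE":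
--         return attrs.get("service_name") or attrs.get("service") or attrs.get("prefered_name") or f"Service_{component_id[:8]}"
--     if ct_str in ("AGENT_PRIMARY", "AGENT_SPECIALIZED"):
--         return attrs.get("prefered_name") or attrs.get("agent_name") or attrs.get("name") or f"Agent_{component_id[:8]}"
--     if ct_str == "INTERFACE":
--         return attrs.get("interface_name") or attrs.get("prefered_name") or attrs.get("service") or f"Interface_{component_id[:8]}"
--     if ct_str == "FUNCTION":
--         return attrs.get("function_name") or attrs.get("name") or f"Function_{component_id[:8]}"
--     return attrs.get("name") or component_id
-- ===== SOURCE B (Python) =====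
-- COMPONENT_TYPE = {
--     "INTERFACE": 0,
--     "AGENT_PRIMARY": 1,
--     "AGENT_SPECIALIZED": 2,
--     "FUNCTION": 3,
--     "SERVICE": 4
-- }
--
-- _NAMES = ("INTERFACE", "AGENT_PRIMARY", "AGENT_SPECIALIZED", "FUNCTION", "SERVICE")
--
-- # per type: ranked attribute keys and the default prefix (None = bare component_id)
-- _RANKED = {
--     "INTERFACE": (("interface_name", "prefered_name", "service"), "Interface_"),
--     "AGENT_PRIMARY": (("prefered_name", "agent_name", "name"), "Agent_"),
--     "AGENT_SPECIALIZED": (("prefered_name", "agent_name", "name"), "Agent_"),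
--     "FUNCTION": (("function_name", "name"), "Function_"),
--     "SERVICE": (("service_name", "service", "prefered_name"), "Service_"),
--     "UNKNOWN": (("name",), None),
-- }
--
--
-- def _derive_node_name(component_type: int, attrs: dict | None, component_id: str) -> str:
--     attrs = attrs or {}
--     ct = int(component_type)
--     ct_name = _NAMES[ct] if 0 <= ct < len(_NAMES) else "UNKNOWN"
--     chain, prefix = _RANKED[ct_name]
--     # one pass over the attrs themselves: best (lowest) rank of a truthy attribute
--     r = len(chain)
--     for k, v in attrs.items():
--         if v and k in chain:
--             r = min(r, chain.index(k))
--     if r < len(chain):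
--         return attrs[chain[r]]
--     return component_id if prefix is None else prefix + component_id[:8]
-- ===== Notes on version B (the rewrite author's own statement) =====
-- stated objective: alternative
-- what changed: Instead of A's per-type 'or'-chains that probe the dict key by key, B resolves the type name by direct indexing into a name tuple and makes a single pass over the attrs items, keeping the lowest rank of any truthy attribute in that type's ranked key list, then does one final lookup (or the default).
import Mathlib
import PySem

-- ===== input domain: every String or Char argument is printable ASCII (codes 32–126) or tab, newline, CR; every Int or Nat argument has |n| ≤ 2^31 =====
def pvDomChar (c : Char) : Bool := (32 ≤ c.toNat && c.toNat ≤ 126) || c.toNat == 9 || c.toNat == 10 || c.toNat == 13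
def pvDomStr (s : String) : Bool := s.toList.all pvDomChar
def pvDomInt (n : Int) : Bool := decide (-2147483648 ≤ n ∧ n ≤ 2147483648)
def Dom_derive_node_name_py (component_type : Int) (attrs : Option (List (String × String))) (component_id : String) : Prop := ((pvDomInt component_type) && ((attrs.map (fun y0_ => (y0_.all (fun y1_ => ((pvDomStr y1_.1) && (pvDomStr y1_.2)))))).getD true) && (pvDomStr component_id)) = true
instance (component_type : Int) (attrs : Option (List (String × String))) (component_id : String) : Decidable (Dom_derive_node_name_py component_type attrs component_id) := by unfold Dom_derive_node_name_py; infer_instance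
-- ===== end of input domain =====

-- B replaces A's per-type 'or'-chains of dict probes by a single pass over the attrs
-- themselves, keeping the best (lowest) rank of a truthy attribute (objective: alternative).

-- ===== PORT A =====
-- COMPONENT_TYPE as A's module defines it (insertion order)
def pvCOMPONENT_TYPE : List (String × Int) :=
  [("INTERFACE", 0), ("AGENT_PRIMARY", 1), ("AGENT_SPECIALIZED", 2), ("FUNCTION", 3), ("SERVICE", 4)]

-- "attrs.get(k) or rest": None and "" are falsy, any other string truthy
def pvAGetOr (d : PySem.Dict String String) (k : String) (rest : String) : String :=
  match d.get? k with
  | some v => if v = "" then rest else v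
  | none => rest

def derive_node_name_py (component_type : Int) (attrs : Option (List (String × String))) (component_id : String) : String :=
  let d : PySem.Dict String String := PySem.Dict.mk (attrs.getD [])   -- attrs = attrs or {}
  -- [k for k, v in COMPONENT_TYPE.items() if v == int(component_type)][0], except → "UNKNOWN"
  let ct_str : String :=
    match PySem.List.pyGet? ((pvCOMPONENT_TYPE.filter (fun kv => kv.2 == component_type)).map (·.1)) 0 with
    | some s => s
    | none => "UNKNOWN"
  if ct_str == "SERVICE" then
    pvAGetOr d "service_name" (pvAGetOr d "service" (pvAGetOr d "prefered_name"
      ("Service_" ++ String.ofList (PySem.List.slice component_id.toList none (some 8)))))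
  else if ct_str == "AGENT_PRIMARY" || ct_str == "AGENT_SPECIALIZED" then
    pvAGetOr d "prefered_name" (pvAGetOr d "agent_name" (pvAGetOr d "name"
      ("Agent_" ++ String.ofList (PySem.List.slice component_id.toList none (some 8)))))
  else if ct_str == "INTERFACE" then
    pvAGetOr d "interface_name" (pvAGetOr d "prefered_name" (pvAGetOr d "service"
      ("Interface_" ++ String.ofList (PySem.List.slice component_id.toList none (some 8)))))
  else if ct_str == "FUNCTION" then
    pvAGetOr d "function_name" (pvAGetOr d "name"
      ("Function_" ++ String.ofList (PySem.List.slice component_id.toList none (some 8))))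
  else
    pvAGetOr d "name" component_id

-- ===== PORT B =====
def pvNAMES : List String :=
  ["INTERFACE", "AGENT_PRIMARY", "AGENT_SPECIALIZED", "FUNCTION", "SERVICE"]

-- _RANKED: type name → (ranked attribute keys, default prefix; none = bare component_id)
def pvRANKED : PySem.Dict String (List String × Option String) :=
  PySem.Dict.mk
    [("INTERFACE", (["interface_name", "prefered_name", "service"], some "Interface_")),
     ("AGENT_PRIMARY", (["prefered_name", "agent_name", "name"], some "Agent_")),
     ("AGENT_SPECIALIZED", (["prefered_name", "agent_name", "name"], some "Agent_")),
     ("FUNCTION", (["function_name", "name"], some "Function_")),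
     ("SERVICE", (["service_name", "service", "prefered_name"], some "Service_")),
     ("UNKNOWN", (["name"], none))]

-- the items of the dict the assoc list denotes (first occurrence of each key, in order):
-- under the type convention the list models a Python dict, whose .items() has unique keys
def pvDictItems : List (String × String) → List String → List (String × String)
  | [], _ => []
  | (k, v) :: rest, seen =>
    if k ∈ seen then pvDictItems rest seen else (k, v) :: pvDictItems rest (k :: seen)

-- loop body: if v and k in chain: r = min(r, chain.index(k))   ('k in chain' and
-- 'chain.index(k)' fused into one PySem.List.index?, exact since index? is none iff k ∉ chain)
def pvStep (chain : List String) (r : Nat) (kv : String × String) : Nat :=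
  if kv.2 ≠ "" then
    match PySem.List.index? chain kv.1 with
    | some i => min r i
    | none => r
  else r

def derive_node_name_py_alt (component_type : Int) (attrs : Option (List (String × String))) (component_id : String) : String :=
  let l : List (String × String) := attrs.getD []                     -- attrs = attrs or {}
  let d : PySem.Dict String String := PySem.Dict.mk l
  -- ct = int(component_type) is the identity on an int
  let ct_name : String :=
    if 0 ≤ component_type ∧ component_type < 5 then PySem.List.pyGetD pvNAMES component_type "" else "UNKNOWN"
  let entry := (pvRANKED.get? ct_name).getD ([], none)                -- ct_name is always a key of _RANKED
  let chain := entry.1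
  let r : Nat := (pvDictItems l []).foldl (pvStep chain) chain.length
  if r < chain.length then
    (d.get? (PySem.List.pyGetD chain (r : Int) "")).getD ""           -- attrs[chain[r]]: the key is present
  else
    match entry.2 with
    | none => component_id
    | some pre => pre ++ String.ofList (PySem.List.slice component_id.toList none (some 8))

-- ===== PRECONDITION & SPEC =====
def Spec_derive_node_name_py (component_type : Int) (attrs : Option (List (String × String))) (component_id : String) (out : String) : Prop := out = derive_node_name_py_alt component_type attrs component_id
instance (component_type : Int) (attrs : Option (List (String × String))) (component_id : String) (out : String) : Decidable (Spec_derive_node_name_py component_type attrs component_id out) := by unfold Spec_derive_node_name_py; infer_instance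

-- ===== CLAIM =====
def Claim_equal_derive_node_name_py : Prop := ∀ (component_type : Int) (attrs : Option (List (String × String))) (component_id : String), Dom_derive_node_name_py component_type attrs component_id → Spec_derive_node_name_py component_type attrs component_id (derive_node_name_py component_type attrs component_id)

-- ===== LEMMAS AND PROOFS =====
-- A's 'or'-chain over a key list, as a recursion (proof-side view of A's nested pvAGetOr)
def pvChainRes (d : PySem.Dict String String) : List String → String → String
  | [], fb => fb
  | k :: ks, fb => pvAGetOr d k (pvChainRes d ks fb)

theorem pvDictItems_get? (l : List (String × String)) (seen : List String) (k : String) :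
    (PySem.Dict.mk (pvDictItems l seen)).get? k =
      if k ∈ seen then none else (PySem.Dict.mk l).get? k := by
  induction l generalizing seen with
  | nil => simp [pvDictItems]; intro h; rfl
  | cons kv rest ih =>
    obtain ⟨k', v'⟩ := kv
    by_cases hs : k' ∈ seen
    · simp only [pvDictItems, if_pos hs, ih]
      by_cases hk : k ∈ seen
      · simp [hk]
      · have : k' ≠ k := fun h => hk (h ▸ hs)
        simp [hk, PySem.Dict.get?_mk_cons, this]
    · simp only [pvDictItems, if_neg hs, PySem.Dict.get?_mk_cons]
      by_cases he : k' = k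
      · subst he
        simp [hs]
      · simp only [beq_iff_eq, if_neg he, ih]
        by_cases hk : k ∈ seen <;> simp [hk, List.mem_cons]
        intro h; exact absurd h.symm he

theorem pvDictItems_keys_not_seen (l : List (String × String)) (seen : List String) (k : String)
    (hk : k ∈ (pvDictItems l seen).map Prod.fst) : k ∉ seen := by
  induction l generalizing seen with
  | nil => simp [pvDictItems] at hk
  | cons kv rest ih =>
    obtain ⟨k', v'⟩ := kv
    by_cases hs : k' ∈ seen
    · exact ih seen (by simpa [pvDictItems, hs] using hk)
    · simp only [pvDictItems, if_neg hs, List.map_cons, List.mem_cons] at hk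
      rcases hk with h | h
      · exact h ▸ hs
      · exact fun hmem => ih (k' :: seen) h (List.mem_cons_of_mem _ hmem)

theorem pvDictItems_keys_nodup (l : List (String × String)) (seen : List String) :
    ((pvDictItems l seen).map Prod.fst).Nodup := by
  induction l generalizing seen with
  | nil => simp [pvDictItems]
  | cons kv rest ih =>
    obtain ⟨k', v'⟩ := kv
    by_cases hs : k' ∈ seen
    · simpa [pvDictItems, hs] using ih seen
    · simp only [pvDictItems, if_neg hs, List.map_cons, List.nodup_cons]
      refine ⟨fun hmem => ?_, ih (k' :: seen)⟩
      exact pvDictItems_keys_not_seen rest (k' :: seen) k' hmem (List.mem_cons_self)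

-- the fold never increases the accumulator
theorem pvStep_le (c : List String) (a : Nat) (kv : String × String) : pvStep c a kv ≤ a := by
  unfold pvStep
  split
  · cases h : PySem.List.index? c kv.1 <;> simp
  · exact le_rfl

theorem pvFoldl_le_init (c : List String) (e : List (String × String)) (a : Nat) :
    e.foldl (pvStep c) a ≤ a := by
  induction e generalizing a with
  | nil => simp
  | cons kv rest ih => exact le_trans (ih (pvStep c a kv)) (pvStep_le c a kv)

theorem pvFoldl_le_of_mem (c : List String) {k v : String} {i : Nat} (hv : v ≠ "")
    (hi : PySem.List.index? c k = some i) :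
    ∀ (e : List (String × String)) (a : Nat), (k, v) ∈ e → e.foldl (pvStep c) a ≤ i := by
  intro e
  induction e with
  | nil => intro a hmem; simp at hmem
  | cons kv rest ih =>
    intro a hmem
    rcases List.mem_cons.mp hmem with h | h
    · refine le_trans (pvFoldl_le_init c rest _) ?_
      rw [← h]
      unfold pvStep
      simp only [hv, ne_eq, not_false_iff, if_true, hi]
      exact Nat.min_le_right a i
    · exact ih _ h

-- key of every truthy entry differs from k → the (k :: ks)-fold is the ks-fold plus one
theorem pvFoldl_shift (k : String) (ks : List String) (e : List (String × String)) (n : Nat)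
    (h : ∀ kv ∈ e, kv.2 ≠ "" → kv.1 ≠ k) :
    e.foldl (pvStep (k :: ks)) (n + 1) = e.foldl (pvStep ks) n + 1 := by
  induction e generalizing n with
  | nil => simp
  | cons kv rest ih =>
    have hrest : ∀ kv ∈ rest, kv.2 ≠ "" → kv.1 ≠ k := fun kv hm => h kv (List.mem_cons_of_mem _ hm)
    simp only [List.foldl_cons]
    have hstep : pvStep (k :: ks) (n + 1) kv = pvStep ks n kv + 1 := by
      by_cases hv : kv.2 ≠ ""
      · have hne : kv.1 ≠ k := h kv List.mem_cons_self hv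
        unfold pvStep
        rw [PySem.List.index?_cons_of_ne ks (Ne.symm hne), if_pos hv, if_pos hv]
        cases hidx : PySem.List.index? ks kv.1 with
        | none => rfl
        | some i => show min (n + 1) (i + 1) = min n i + 1; omega
      · simp only [pvStep, if_neg hv]
    rw [hstep]
    exact ih _ hrest

-- the min-rank scan over a key-nodup item list computes A's first-truthy probe chain
theorem pvScan_eq_chain (c : List String) (e : List (String × String))
    (he : (e.map Prod.fst).Nodup) (d : PySem.Dict String String)
    (hd : ∀ k, d.get? k = (PySem.Dict.mk e).get? k) (fb : String) :
    (if e.foldl (pvStep c) c.length < c.length then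
        (d.get? (PySem.List.pyGetD c ((e.foldl (pvStep c) c.length : Nat) : Int) "")).getD ""
      else fb) = pvChainRes d c fb := by
  induction c generalizing fb with
  | nil =>
    have h0 : e.foldl (pvStep []) 0 = 0 := Nat.le_zero.mp (pvFoldl_le_init _ _ _)
    simp [pvChainRes, h0]
  | cons k ks ih =>
    by_cases htr : ∃ v, (PySem.Dict.mk e).get? k = some v ∧ v ≠ ""
    · obtain ⟨v, hget, hv⟩ := htr
      have hmem : (k, v) ∈ e := PySem.Dict.mem_items_of_get?_eq_some (PySem.Dict.mk e) hget
      have hr : e.foldl (pvStep (k :: ks)) (k :: ks).length = 0 :=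
        Nat.le_zero.mp (pvFoldl_le_of_mem (k :: ks) hv (PySem.List.index?_cons_self k ks) e ((k :: ks).length) hmem)
      rw [hr]
      simp [pvChainRes, pvAGetOr, hd, hget, hv, List.length_cons, PySem.List.pyGetD]
    · push Not at htr
      have hkey : ∀ kv ∈ e, kv.2 ≠ "" → kv.1 ≠ k := by
        rintro ⟨k', v'⟩ hmem hv' rfl
        have hg : (PySem.Dict.mk e).get? k' = some v' :=
          PySem.Dict.get?_of_mem_items (PySem.Dict.mk e) hmem he
        exact hv' (htr v' hg)
      have hshift := pvFoldl_shift k ks e ks.length hkey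
      have hchain : pvChainRes d (k :: ks) fb = pvChainRes d ks fb := by
        cases hg : (PySem.Dict.mk e).get? k with
        | none => simp [pvChainRes, pvAGetOr, hd, hg]
        | some v =>
          have hveq : v = "" := htr v hg
          simp [pvChainRes, pvAGetOr, hd, hg, hveq]
      rw [hchain, ← ih fb]
      have hlen : (k :: ks).length = ks.length + 1 := rfl
      rw [hlen, hshift]
      by_cases hlt : e.foldl (pvStep ks) ks.length < ks.length
      · rw [if_pos (by omega), if_pos hlt]
        congr 2
        push_cast
        rw [show ((e.foldl (pvStep ks) ks.length : Nat) : Int) + 1 =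
              (((e.foldl (pvStep ks) ks.length + 1 : Nat)) : Int) by push_cast; ring]
        rw [PySem.List.pyGetD_natCast, PySem.List.pyGetD_natCast]
        simp
      · rw [if_neg (by omega), if_neg hlt]

-- B's dict lookups agree with A's (first occurrence per key)
theorem pvItems_get?_nil (l : List (String × String)) (k : String) :
    (PySem.Dict.mk (pvDictItems l [])).get? k = (PySem.Dict.mk l).get? k := by
  simpa using pvDictItems_get? l [] k

theorem derive_eq (component_type : Int) (attrs : Option (List (String × String))) (component_id : String) :
    derive_node_name_py component_type attrs component_id = derive_node_name_py_alt component_type attrs component_id := by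
  set l := attrs.getD [] with hl
  have he := pvDictItems_keys_nodup l []
  have hd : ∀ k, (PySem.Dict.mk l).get? k = (PySem.Dict.mk (pvDictItems l [])).get? k :=
    fun k => (pvItems_get?_nil l k).symm
  have main : ∀ (c : List String) (fb : String),
      (if (pvDictItems l []).foldl (pvStep c) c.length < c.length then
          ((PySem.Dict.mk l).get? (PySem.List.pyGetD c (((pvDictItems l []).foldl (pvStep c) c.length : Nat) : Int) "")).getD ""
        else fb) = pvChainRes (PySem.Dict.mk l) c fb := by
    intro c fb
    have := pvScan_eq_chain c (pvDictItems l []) he (PySem.Dict.mk l) hd fb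
    simpa using this
  by_cases h0 : component_type = 0
  · subst h0
    have := main ["interface_name", "prefered_name", "service"]
      ("Interface_" ++ String.ofList (PySem.List.slice component_id.toList none (some 8)))
    simp only [derive_node_name_py, derive_node_name_py_alt, pvCOMPONENT_TYPE] at *
    simp only [← hl]
    simpa [pvChainRes, PySem.List.pyGet?, PySem.List.pyIdx?, pvNAMES, pvRANKED,
      PySem.Dict.get?_mk_cons, PySem.List.pyGetD, List.filter] using this.symm
  by_cases h1 : component_type = 1
  · subst h1
    have := main ["prefered_name", "agent_name", "name"]
      ("Agent_" ++ String.ofList (PySem.List.slice component_id.toList none (some 8)))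
    simp only [derive_node_name_py, derive_node_name_py_alt, pvCOMPONENT_TYPE] at *
    simp only [← hl]
    simpa [pvChainRes, PySem.List.pyGet?, PySem.List.pyIdx?, pvNAMES, pvRANKED,
      PySem.Dict.get?_mk_cons, PySem.List.pyGetD, List.filter] using this.symm
  by_cases h2 : component_type = 2
  · subst h2
    have := main ["prefered_name", "agent_name", "name"]
      ("Agent_" ++ String.ofList (PySem.List.slice component_id.toList none (some 8)))
    simp only [derive_node_name_py, derive_node_name_py_alt, pvCOMPONENT_TYPE] at *
    simp only [← hl]
    simpa [pvChainRes, PySem.List.pyGet?, PySem.List.pyIdx?, pvNAMES, pvRANKED,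
      PySem.Dict.get?_mk_cons, PySem.List.pyGetD, List.filter] using this.symm
  by_cases h3 : component_type = 3
  · subst h3
    have := main ["function_name", "name"]
      ("Function_" ++ String.ofList (PySem.List.slice component_id.toList none (some 8)))
    simp only [derive_node_name_py, derive_node_name_py_alt, pvCOMPONENT_TYPE] at *
    simp only [← hl]
    simpa [pvChainRes, PySem.List.pyGet?, PySem.List.pyIdx?, pvNAMES, pvRANKED,
      PySem.Dict.get?_mk_cons, PySem.List.pyGetD, List.filter] using this.symm
  by_cases h4 : component_type = 4
  · subst h4
    have := main ["service_name", "service", "prefered_name"]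
      ("Service_" ++ String.ofList (PySem.List.slice component_id.toList none (some 8)))
    simp only [derive_node_name_py, derive_node_name_py_alt, pvCOMPONENT_TYPE] at *
    simp only [← hl]
    simpa [pvChainRes, PySem.List.pyGet?, PySem.List.pyIdx?, pvNAMES, pvRANKED,
      PySem.Dict.get?_mk_cons, PySem.List.pyGetD, List.filter] using this.symm
  · have := main ["name"] component_id
    have e0 : (((0 : Int) == component_type)) = false := beq_eq_false_iff_ne.mpr (Ne.symm h0)
    have e1 : (((1 : Int) == component_type)) = false := beq_eq_false_iff_ne.mpr (Ne.symm h1)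
    have e2 : (((2 : Int) == component_type)) = false := beq_eq_false_iff_ne.mpr (Ne.symm h2)
    have e3 : (((3 : Int) == component_type)) = false := beq_eq_false_iff_ne.mpr (Ne.symm h3)
    have e4 : (((4 : Int) == component_type)) = false := beq_eq_false_iff_ne.mpr (Ne.symm h4)
    have hcn : ¬ (0 ≤ component_type ∧ component_type < 5) ∨ True := Or.inr trivial
    simp only [derive_node_name_py, derive_node_name_py_alt, pvCOMPONENT_TYPE] at *
    simp only [← hl]
    by_cases hr : 0 ≤ component_type ∧ component_type < 5
    · exfalso; omega
    · simpa [pvChainRes, PySem.List.pyGet?, PySem.List.pyIdx?, pvNAMES, pvRANKED, hr,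
        PySem.Dict.get?_mk_cons, PySem.List.pyGetD, List.filter, e0, e1, e2, e3, e4] using this.symm

-- ===== VERDICT =====
theorem derive_node_name_py_spec : Claim_equal_derive_node_name_py := by
  intro ct attrs cid _
  unfold Spec_derive_node_name_py
  exact derive_eq ct attrs cid
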